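-- pv_equiv track=rewrite | github.com/Wlodeks939/HelsinkiPythonMOOC2024 | Part05/07_sudoku_grid.py | column_correct
-- ===== SOURCE A (Python) =====
-- def column_correct(sudoku: list, column_no: int):
--
--     col_sorted = []
--
--     #arma una lista de numeros. Para cada fila solo agrega la columna dada
--     for row in sudoku:
--         col_sorted.append(row[column_no])
--
--     col_sorted = sorted(col_sorted)
--
--     # recorre la lista ordenada comparando adyacentes para encontrar duplicados
--     for i in range(len(col_sorted)-1):
--         if col_sorted[i] == col_sorted[i+1] and col_sorted[i] != 0:
--             return False
--
--     return True
-- ===== SOURCE B (Python) =====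
-- def column_correct(sudoku: list, column_no: int):
--     seen = set()
--     for row in sudoku:
--         val = row[column_no]
--         if val == 0:
--             continue
--         if val in seen:
--             return False
--         seen.add(val)
--     return True
-- ===== Notes on version B (the rewrite author's own statement) =====
-- stated objective: idiomatic
-- what changed: Replaces building the whole column, sorting it and scanning adjacent pairs with a single pass over the rows maintaining a 'seen' set of nonzero values.
import Mathlib
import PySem

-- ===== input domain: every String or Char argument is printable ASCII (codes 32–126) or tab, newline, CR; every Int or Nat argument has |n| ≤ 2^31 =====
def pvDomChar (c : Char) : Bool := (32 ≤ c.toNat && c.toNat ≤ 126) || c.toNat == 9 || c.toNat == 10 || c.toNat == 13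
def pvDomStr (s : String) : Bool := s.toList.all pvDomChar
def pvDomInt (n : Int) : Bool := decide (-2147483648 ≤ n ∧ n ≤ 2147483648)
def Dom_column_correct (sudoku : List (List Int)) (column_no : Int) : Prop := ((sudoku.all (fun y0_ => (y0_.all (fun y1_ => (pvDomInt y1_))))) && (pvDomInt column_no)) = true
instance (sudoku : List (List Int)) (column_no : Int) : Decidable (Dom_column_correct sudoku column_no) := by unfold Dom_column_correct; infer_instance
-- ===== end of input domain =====

-- B replaces A's collect-sort-and-scan-adjacent-pairs duplicate check by a single pass
-- over the rows with a 'seen' set of nonzero values (idiomatic; no sort).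


-- ===== PORT A =====
-- the first loop: col_sorted.append(row[column_no]) for each row (none = IndexError somewhere)
def aCol (sudoku : List (List Int)) (column_no : Int) : Option (List Int) :=
  match sudoku with
  | [] => some []
  | row :: rest =>
    match PySem.List.pyGet? row column_no with
    | none => none
    | some v => (aCol rest column_no).map (fun l => v :: l)

-- the second loop: compare adjacent entries of the sorted list
def aScan (l : List Int) : Bool :=
  match l with
  | x :: y :: rest => if x = y ∧ x ≠ 0 then false else aScan (y :: rest)
  | _ => true

def column_correct (sudoku : List (List Int)) (column_no : Int) : Bool :=
  match aCol sudoku column_no with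
  | none => false   -- Python raises IndexError here; excluded by Pre_
  | some col => aScan (PySem.List.sorted col (fun x => x) false)

-- ===== PORT B =====
def bLoop (sudoku : List (List Int)) (column_no : Int) (seen : PySem.Set Int) : Bool :=
  match sudoku with
  | [] => true
  | row :: rest =>
    match PySem.List.pyGet? row column_no with
    | none => false   -- Python raises IndexError here; excluded by Pre_
    | some v =>
      if v = 0 then bLoop rest column_no seen
      else if PySem.Set.contains seen v then false
      else bLoop rest column_no (PySem.Set.add seen v)

def column_correct_alt (sudoku : List (List Int)) (column_no : Int) : Bool :=
  bLoop sudoku column_no PySem.Set.empty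

-- ===== PRECONDITION & SPEC =====
-- Pre_ excludes exactly the inputs where row[column_no] raises IndexError in both Pythons.
def Pre_column_correct (sudoku : List (List Int)) (column_no : Int) : Prop :=
  ∀ row ∈ sudoku, PySem.Raise.InRange row.length column_no
instance (sudoku : List (List Int)) (column_no : Int) : Decidable (Pre_column_correct sudoku column_no) := by unfold Pre_column_correct; infer_instance
def pvWitness_column_correct : List (List Int) × Int := ([[1, 2], [2, 0], [0, 3]], 1)

def Spec_column_correct (sudoku : List (List Int)) (column_no : Int) (out : Bool) : Prop := out = column_correct_alt sudoku column_no
instance (sudoku : List (List Int)) (column_no : Int) (out : Bool) : Decidable (Spec_column_correct sudoku column_no out) := by unfold Spec_column_correct; infer_instance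

-- ===== CLAIM (what is proved, stated in full; the proofs are below) =====
def Claim_equal_column_correct : Prop := ∀ (sudoku : List (List Int)) (column_no : Int), Dom_column_correct sudoku column_no → Pre_column_correct sudoku column_no → Spec_column_correct sudoku column_no (column_correct sudoku column_no)

-- ===== LEMMAS AND PROOFS =====

-- Under Pre_, the column extraction succeeds.
theorem aCol_isSome (sudoku : List (List Int)) (column_no : Int)
    (h : ∀ row ∈ sudoku, PySem.Raise.InRange row.length column_no) :
    ∃ col, aCol sudoku column_no = some col := by
  induction sudoku with
  | nil => exact ⟨[], rfl⟩
  | cons row rest ih =>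
    obtain ⟨col, hc⟩ := ih (fun r hr => h r (List.mem_cons_of_mem _ hr))
    have hr := h row (List.mem_cons_self ..)
    have hne : PySem.List.pyGet? row column_no ≠ none := by
      rw [Ne, PySem.List.pyGet?_eq_none_iff]; exact not_not_intro hr
    obtain ⟨v, hv⟩ := Option.ne_none_iff_exists'.mp hne
    exact ⟨v :: col, by simp [aCol, hv, hc]⟩

-- A's sorted adjacent scan says: every nonzero value occurs at most once.
theorem aScan_sorted_iff (l : List Int) (hp : l.Pairwise (· ≤ ·)) :
    aScan l = true ↔ ∀ v : Int, v ≠ 0 → l.count v ≤ 1 := by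
  induction l with
  | nil => simp [aScan]
  | cons x t ih =>
    cases t with
    | nil =>
      simp only [aScan, true_iff]
      intro v hv
      have : [x].count v ≤ [x].length := List.count_le_length
      simpa using this
    | cons y r =>
      have hxy : x ≤ y := (List.pairwise_cons.mp hp).1 y (List.mem_cons_self ..)
      have hpt : (y :: r).Pairwise (· ≤ ·) := (List.pairwise_cons.mp hp).2
      rw [show aScan (x :: y :: r) = if x = y ∧ x ≠ 0 then false else aScan (y :: r) from rfl]
      split_ifs with hcond
      · constructor
        · intro h; exact absurd h (by simp)
        · intro h
          have := h x hcond.2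
          have e : (x :: y :: r).count x = (y :: r).count x + 1 := by
            simp [List.count_cons]
          have e2 : (y :: r).count x = r.count x + 1 := by
            simp [hcond.1]
          omega
      · rw [ih hpt]
        constructor
        · intro h v hv
          by_cases hvx : v = x
          · have hx_ne_y : x ≠ y := fun he => hcond ⟨he, by omega⟩
            have hxlty : x < y := lt_of_le_of_ne hxy hx_ne_y
            have hcnt : (y :: r).count v = 0 := by
              rw [List.count_eq_zero]
              intro hmem
              rcases List.mem_cons.mp hmem with h1 | h2
              · omega
              · have : y ≤ v := (List.pairwise_cons.mp hpt).1 v h2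
                omega
            have e : (x :: y :: r).count v = (y :: r).count v + 1 := by
              simp [List.count_cons, hvx]
            omega
          · have := h v hv
            have hxv : x ≠ v := fun h => hvx h.symm
            have e : (x :: y :: r).count v = (y :: r).count v := by
              simp [List.count_cons, hxv]
            omega
        · intro h v hv
          have := h v hv
          have e : (x :: y :: r).count v ≤ (y :: r).count v + 1 := by
            simp only [List.count_cons, beq_iff_eq]; split_ifs <;> omega
          have e2 : (y :: r).count v ≤ (x :: y :: r).count v := by
            simp only [List.count_cons, beq_iff_eq]; split_ifs <;> omega
          omega

-- B's loop invariant: with a duplicate-free 'seen', it succeeds iff every nonzero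
-- value occurs at most once counting both the column and 'seen'.
theorem bLoop_iff (sudoku : List (List Int)) (column_no : Int) (col : List Int)
    (seen : PySem.Set Int)
    (hcol : aCol sudoku column_no = some col) (hnd : seen.Nodup) :
    bLoop sudoku column_no seen = true ↔
      ∀ v : Int, v ≠ 0 → col.count v + seen.count v ≤ 1 := by
  induction sudoku generalizing col seen with
  | nil =>
    simp only [aCol, Option.some.injEq] at hcol
    subst hcol
    simp only [bLoop, true_iff]
    intro v hv
    have := List.nodup_iff_count_le_one.mp hnd v
    simpa using this
  | cons row rest ih =>
    simp only [aCol] at hcol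
    cases hget : PySem.List.pyGet? row column_no with
    | none => simp [hget] at hcol
    | some v =>
      rw [hget] at hcol
      cases hrest : aCol rest column_no with
      | none => simp [hrest] at hcol
      | some tl =>
        rw [hrest] at hcol
        simp only [Option.map_some, Option.some.injEq] at hcol
        subst hcol
        rw [show bLoop (row :: rest) column_no seen =
          (if v = 0 then bLoop rest column_no seen
           else if PySem.Set.contains seen v then false
           else bLoop rest column_no (PySem.Set.add seen v)) by simp [bLoop, hget]]
        by_cases hv0 : v = 0
        · subst hv0
          rw [if_pos rfl, ih tl seen hrest hnd]
          constructor
          · intro h w hw; have := h w hw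
            simpa [Ne.symm hw] using this
          · intro h w hw; have := h w hw
            simpa [Ne.symm hw]
        · rw [if_neg hv0]
          by_cases hmem : v ∈ seen
          · rw [if_pos (by simpa [PySem.Set.contains] using hmem)]
            constructor
            · intro h; exact absurd h (by simp)
            · intro h
              exfalso
              have := h v hv0
              have h1 : 1 ≤ seen.count v := List.one_le_count_iff.mpr hmem
              simp at this
              omega
          · rw [if_neg (by simpa [PySem.Set.contains] using hmem)]
            have hadd : PySem.Set.add seen v = seen ++ [v] := by
              simp [PySem.Set.add, PySem.Set.contains, hmem]
            have hnd' : (PySem.Set.add seen v).Nodup := by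
              rw [hadd]
              simp only [List.nodup_append, List.nodup_cons, List.not_mem_nil,
                not_false_iff, List.nodup_nil, and_true, true_and]
              refine ⟨hnd, fun a ha => by simp; intro hav; exact hmem (hav ▸ ha)⟩
            rw [ih tl _ hrest hnd']
            constructor
            · intro h w hw
              have := h w hw
              rw [hadd] at this
              by_cases hwv : w = v
              · subst hwv; simp [List.count_append] at this ⊢; omega
              · simp [List.count_append, Ne.symm hwv] at this ⊢; omega
            · intro h w hw
              have := h w hw
              rw [hadd]
              by_cases hwv : w = v
              · subst hwv; simp [List.count_append] at this ⊢; omega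
              · simp [List.count_append, Ne.symm hwv] at this ⊢; omega

-- ===== VERDICT (by name: the statement is the Claim_ definition above) =====
theorem column_correct_spec : Claim_equal_column_correct := by
  intro sudoku column_no _ hpre
  unfold Spec_column_correct column_correct column_correct_alt
  obtain ⟨col, hcol⟩ := aCol_isSome sudoku column_no hpre
  rw [hcol]
  have hA := aScan_sorted_iff (PySem.List.sorted col (fun x => x) false)
    (by simpa using PySem.List.sorted_pairwise (xs := col) (key := fun x => x))
  have hperm : (PySem.List.sorted col (fun x => x) false).Perm col :=
    PySem.List.sorted_perm ..
  have hB := bLoop_iff sudoku column_no col PySem.Set.empty hcol (by simp [PySem.Set.empty])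
  have hsame : (aScan (PySem.List.sorted col (fun x => x) false) = true) ↔
      (bLoop sudoku column_no PySem.Set.empty = true) := by
    rw [hA, hB]
    constructor
    · intro h v hv
      have := h v hv
      rw [hperm.count_eq] at this
      simpa [PySem.Set.empty] using this
    · intro h v hv
      have := h v hv
      rw [hperm.count_eq]
      simpa [PySem.Set.empty] using this
  cases hA' : aScan (PySem.List.sorted col (fun x => x) false) <;>
    cases hB' : bLoop sudoku column_no PySem.Set.empty <;>
    (rw [hA', hB'] at hsame; simp at hsame ⊢) <;> simp_all
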